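-- pv_equiv track=rewrite | github.com/Nikcet/solutions_for_coursera | solution-fhaction.py | ReduceFraction
-- ===== SOURCE A (Python) =====
-- def ReduceFraction(n, m):
--     p1 = max(n, m)
--     p2 = min(n, m)
--     if p1 == p2 and p1 * p2 != 0:
--         return 1, 1
--     else:
--         p = p1 % p2
--         while p > 0:
--             p1 = p2
--             p2 = p
--             p = p1 % p2
--         p = n // p2
--         q = m // p2
--         return p, q
-- ===== SOURCE B (Python) =====
-- def _euclid(a, b):
--     r = a % b
--     return _euclid(b, r) if r > 0 else b
--
--
-- def ReduceFraction(n, m):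
--     d = _euclid(max(n, m), min(n, m))
--     return n // d, m // d
-- ===== Notes on version B (the rewrite author's own statement) =====
-- stated objective: simpler
-- what changed: Replaces the three-variable while loop and the redundant p1==p2 special case with a two-line recursive Euclidean helper; the answer for equal nonzero inputs falls out of the general division path.
import Mathlib
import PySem

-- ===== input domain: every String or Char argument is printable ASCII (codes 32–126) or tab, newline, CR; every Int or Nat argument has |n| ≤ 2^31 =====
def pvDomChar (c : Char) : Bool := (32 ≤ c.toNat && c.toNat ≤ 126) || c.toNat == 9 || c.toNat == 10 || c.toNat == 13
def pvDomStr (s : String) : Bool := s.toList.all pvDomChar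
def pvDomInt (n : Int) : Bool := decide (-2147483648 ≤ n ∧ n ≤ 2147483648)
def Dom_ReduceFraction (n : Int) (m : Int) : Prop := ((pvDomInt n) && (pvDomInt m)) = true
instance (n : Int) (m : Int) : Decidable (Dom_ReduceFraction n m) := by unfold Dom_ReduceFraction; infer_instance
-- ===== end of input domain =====

-- B replaces A's while loop and its redundant equal-inputs special case by a short recursive
-- Euclidean helper (objective: simpler).

-- ===== PORT A =====
-- the while loop of A: state (p1, p2, p); one step does p1 := p2; p2 := p; p := p1 % p2
def pvALoop (p1 p2 p : Int) : Int :=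
  if h : p > 0 then pvALoop p2 p (PySem.Int.mod p2 p) else p2
termination_by p.toNat
decreasing_by
  have h1 := PySem.Int.mod_lt p2 h
  have h2 := PySem.Int.mod_nonneg p2 h
  omega

def ReduceFraction (n : Int) (m : Int) : Int × Int :=
  let p1 := max n m
  let p2 := min n m
  if p1 = p2 ∧ p1 * p2 ≠ 0 then (1, 1)
  else
    let p2 := pvALoop p1 p2 (PySem.Int.mod p1 p2)
    (PySem.Int.floordiv n p2, PySem.Int.floordiv m p2)

-- ===== PORT B =====
def pvEuclid (a b : Int) : Int :=
  -- r := a % b, inlined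
  if h : PySem.Int.mod a b > 0 then pvEuclid b (PySem.Int.mod a b) else b
termination_by (PySem.Int.mod a b).toNat
decreasing_by
  have h1 := PySem.Int.mod_lt b h
  have h2 := PySem.Int.mod_nonneg b h
  omega

def ReduceFraction_alt (n : Int) (m : Int) : Int × Int :=
  let d := pvEuclid (max n m) (min n m)
  (PySem.Int.floordiv n d, PySem.Int.floordiv m d)

-- ===== PRECONDITION & SPEC =====
-- Pre_ excludes exactly the inputs where Python A raises ZeroDivisionError: min(n,m) = 0.
def Pre_ReduceFraction (n : Int) (m : Int) : Prop := min n m ≠ 0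
instance (n : Int) (m : Int) : Decidable (Pre_ReduceFraction n m) := by
  unfold Pre_ReduceFraction; infer_instance

def pvWitness_ReduceFraction : Int × Int := (6, 4)

def Spec_ReduceFraction (n : Int) (m : Int) (out : Int × Int) : Prop := out = ReduceFraction_alt n m
instance (n : Int) (m : Int) (out : Int × Int) : Decidable (Spec_ReduceFraction n m out) := by
  unfold Spec_ReduceFraction; infer_instance

-- ===== CLAIM (what is proved, stated in full; the proofs are below) =====
def Claim_equal_ReduceFraction : Prop := ∀ (n : Int) (m : Int), Dom_ReduceFraction n m → Pre_ReduceFraction n m → Spec_ReduceFraction n m (ReduceFraction n m)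

-- ===== LEMMAS AND PROOFS =====

-- B's recursion is A's loop: euclid a b unrolls to the loop started at p = a % b
theorem pvEuclid_eq_loop (a b : Int) : pvEuclid a b = pvALoop a b (PySem.Int.mod a b) := by
  fun_induction pvEuclid a b with
  | case1 a b h ih =>
    rw [pvALoop, dif_pos h, ← ih, pvEuclid.eq_def]
  | case2 a b h =>
    rw [pvALoop, dif_neg h]

theorem floordiv_self_of_ne_zero (a : Int) (h : a ≠ 0) : PySem.Int.floordiv a a = 1 := by
  have hm : PySem.Int.mod a a = 0 := (PySem.Int.mod_eq_zero_iff_dvd a a).mpr dvd_rfl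
  have hd := PySem.Int.floordiv_mul_add_mod a a
  rw [hm, add_zero] at hd
  have : (PySem.Int.floordiv a a - 1) * a = 0 := by ring_nf; omega
  rcases mul_eq_zero.mp this with h1 | h1
  · omega
  · exact absurd h1 h

-- ===== VERDICT (by name: the statement is the Claim_ definition above) =====
theorem ReduceFraction_spec : Claim_equal_ReduceFraction := by
  intro n m _ hpre
  unfold Spec_ReduceFraction ReduceFraction ReduceFraction_alt
  by_cases heq : max n m = min n m ∧ max n m * min n m ≠ 0
  · -- n = m ≠ 0: A's special case; B divides n by pvEuclid n n = n
    have hnm : n = m := by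
      have h1 := heq.1
      rcases le_total n m with h | h
      · rw [max_eq_right h, min_eq_left h] at h1; omega
      · rw [max_eq_left h, min_eq_right h] at h1; omega
    subst hnm
    have hn : n ≠ 0 := by simpa [Pre_ReduceFraction] using hpre
    have hmod : PySem.Int.mod n n = 0 := (PySem.Int.mod_eq_zero_iff_dvd n n).mpr dvd_rfl
    have heu : pvEuclid n n = n := by
      rw [pvEuclid]
      simp [hmod]
    have hcond : max n n = min n n ∧ max n n * min n n ≠ 0 :=
      ⟨rfl, by simpa using mul_ne_zero hn hn⟩
    rw [if_pos hcond]
    simp only [max_self, min_self]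
    rw [heu, floordiv_self_of_ne_zero n hn]
  · rw [if_neg heq, pvEuclid_eq_loop]
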